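-- pv_equiv track=rewrite | github.com/evenhu9/AutoPT | AutoPT/utils.py | _extract_poc_from_readme
-- ===== SOURCE A (Python) =====
-- def _extract_poc_from_readme(text: str) -> str:
--     """从 README 中提取 PoC 相关内容"""
--     lines = text.split('\n')
--     result = []
--     in_code_block = False
--     code_blocks = []
--     current_block = []
--
--     for line in lines:
--         # 检测代码块
--         if line.strip().startswith('```'):
--             if in_code_block:
--                 # 结束代码块
--                 code_blocks.append('\n'.join(current_block))
--                 current_block = []
--             in_code_block = not in_code_block
--             continue
--
--         if in_code_block:
--             current_block.append(line)
--         else: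
--             # 保留标题和关键描述
--             lower_line = line.lower()
--             if any(kw in lower_line for kw in ['poc', 'exploit', 'payload', 'curl', 'http', 'vulnerability', '漏洞', '利用', '复现']):
--                 result.append(line)
--
--     # 组合输出：关键描述 + 所有代码块
--     output = '\n'.join(result[:10])  # 最多10行描述
--     if code_blocks:
--         output += '\n\n=== CODE BLOCKS (PoC) ===\n'
--         for i, block in enumerate(code_blocks[:5], 1):  # 最多5个代码块
--             output += f"\n--- Block {i} ---\n{block}\n"
--
--     return output if output.strip() else text[:2000]
-- ===== SOURCE B (Python) =====
-- _KEYWORDS = ['poc', 'exploit', 'payload', 'curl', 'http', 'vulnerability', '漏洞', '利用', '复现']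
--
--
-- def _is_fence(line):
--     return line.strip().startswith('```')
--
--
-- def _extract_poc_from_readme(text: str) -> str:
--     """Index-based rewrite: scan ahead for each closing fence instead of a toggle flag."""
--     lines = text.split('\n')
--     n = len(lines)
--     descs = []
--     blocks = []
--     i = 0
--     while i < n:
--         line = lines[i]
--         if _is_fence(line):
--             # find the matching closing fence
--             j = i + 1
--             while j < n and not _is_fence(lines[j]):
--                 j += 1
--             if j < n:
--                 blocks.append('\n'.join(lines[i + 1:j]))
--                 i = j + 1
--             else:
--                 i = n  # unclosed block: trailing lines are dropped
--         else:
--             low = line.lower()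
--             if any(kw in low for kw in _KEYWORDS):
--                 descs.append(line)
--             i += 1
--     parts = ['\n'.join(descs[:10])]
--     if blocks:
--         parts.append('\n\n=== CODE BLOCKS (PoC) ===\n')
--         for k, block in enumerate(blocks[:5], 1):
--             parts.append(f"\n--- Block {k} ---\n{block}\n")
--     output = ''.join(parts)
--     return output if output.strip() else text[:2000]
-- ===== Notes on version B (the rewrite author's own statement) =====
-- stated objective: alternative
-- what changed: Replaces the single toggle-flag loop (in_code_block boolean with a current_block accumulator) by an index-based scan that, on each opening fence, scans ahead for the matching closing fence and slices the block out, handling description lines in the non-block regions only.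
import Mathlib
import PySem

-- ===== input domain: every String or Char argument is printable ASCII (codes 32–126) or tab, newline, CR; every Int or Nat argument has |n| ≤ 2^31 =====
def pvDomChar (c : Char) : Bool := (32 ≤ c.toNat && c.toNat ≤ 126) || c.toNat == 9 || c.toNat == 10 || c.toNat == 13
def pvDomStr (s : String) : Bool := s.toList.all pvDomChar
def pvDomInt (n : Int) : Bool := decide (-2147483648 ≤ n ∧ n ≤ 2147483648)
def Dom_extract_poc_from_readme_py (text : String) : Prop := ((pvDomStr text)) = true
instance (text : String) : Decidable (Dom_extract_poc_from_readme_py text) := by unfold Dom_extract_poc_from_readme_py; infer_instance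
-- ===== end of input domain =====

-- B replaces A's toggle-flag single loop by an index/scan-ahead decomposition (pair each opening
-- fence with its closing fence, slice the block out); same return value, same cost (objective: alternative).

-- shared one-line helpers (both Pythons test fences and keywords identically)
-- text.split('\n'); split? is none only for an empty separator, the separator here is "\n"
def pvLines (text : String) : List String := (PySem.Str.split? text "\n").getD []

def pvFence (line : String) : Bool := PySem.Str.startswith (PySem.Str.strip line) "```"

def pvKw (line : String) : Bool :=
  ["poc", "exploit", "payload", "curl", "http", "vulnerability", "漏洞", "利用", "复现"].any
    (fun kw => PySem.Str.isIn kw (PySem.Str.lower line))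

-- ===== PORT A =====
-- loop state: (result, in_code_block, code_blocks, current_block)
def pvStepA (st : List String × Bool × List String × List String) (line : String) :
    List String × Bool × List String × List String :=
  if pvFence line then
    (st.1, !st.2.1,
     if st.2.1 then st.2.2.1 ++ [PySem.Str.join "\n" st.2.2.2] else st.2.2.1,
     if st.2.1 then [] else st.2.2.2)
  else if st.2.1 then
    (st.1, st.2.1, st.2.2.1, st.2.2.2 ++ [line])
  else if pvKw line then
    (st.1 ++ [line], st.2.1, st.2.2.1, st.2.2.2)
  else st

def extract_poc_from_readme_py (text : String) : String :=
  let lines := pvLines text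
  let st := lines.foldl pvStepA ([], false, [], [])
  let result := st.1
  let code_blocks := st.2.2.1
  let output := PySem.Str.join "\n" (PySem.List.slice result none (some 10))
  let output :=
    if code_blocks.isEmpty then output
    else
      ((PySem.List.slice code_blocks none (some 5)).foldl
        (fun (acc : String × Int) block =>
          (acc.1 ++ ("\n--- Block " ++ PySem.Int.toStr acc.2 ++ " ---\n" ++ block ++ "\n"),
           acc.2 + 1))
        (output ++ "\n\n=== CODE BLOCKS (PoC) ===\n", 1)).1
  if PySem.Str.strip output == "" then PySem.Str.slice text none (some 2000) else output

-- ===== PORT B =====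
-- the inner while loop of Source B: scan for the closing fence; some (block, rest-after-close),
-- none when no closing fence exists (the unclosed-block case, trailing lines dropped)
def pvSplitBlock : List String → Option (List String × List String)
  | [] => none
  | l :: rest =>
    if pvFence l then some ([], rest)
    else
      match pvSplitBlock rest with
      | none => none
      | some (b, r) => some (l :: b, r)

theorem pvSplitBlock_lt :
    ∀ (xs b r : List String), pvSplitBlock xs = some (b, r) → r.length < xs.length := by
  intro xs
  induction xs with
  | nil => intro b r h; simp [pvSplitBlock] at h
  | cons l rest ih =>
    intro b r h
    by_cases hf : pvFence l
    · simp [pvSplitBlock, hf] at h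
      obtain ⟨hb, hr⟩ := h
      subst hr
      simp
    · simp only [pvSplitBlock, hf, Bool.false_eq_true, ite_false] at h
      cases hsb : pvSplitBlock rest with
      | none => rw [hsb] at h; simp at h
      | some br =>
        rw [hsb] at h
        obtain ⟨b', r'⟩ := br
        simp only [Option.some.injEq, Prod.mk.injEq] at h
        obtain ⟨hb, hr⟩ := h
        subst hr
        have := ih b' r' hsb
        simp
        omega

-- the outer while loop of Source B: (descriptions, joined code blocks)
def pvScan : List String → List String × List String
  | [] => ([], [])
  | l :: rest =>
    if pvFence l then
      match h : pvSplitBlock rest with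
      | none => ([], [])
      | some (b, r) =>
        ((pvScan r).1, PySem.Str.join "\n" b :: (pvScan r).2)
    else
      ((if pvKw l then l :: (pvScan rest).1 else (pvScan rest).1), (pvScan rest).2)
termination_by xs => xs.length
decreasing_by
  all_goals simp
  all_goals (have := pvSplitBlock_lt rest b r h; omega)

def extract_poc_from_readme_py_alt (text : String) : String :=
  let lines := pvLines text
  let descs := (pvScan lines).1
  let blocks := (pvScan lines).2
  let parts := [PySem.Str.join "\n" (PySem.List.slice descs none (some 10))]
  let parts :=
    if blocks.isEmpty then parts
    else
      ((PySem.List.slice blocks none (some 5)).foldl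
        (fun (acc : List String × Int) block =>
          (acc.1 ++ ["\n--- Block " ++ PySem.Int.toStr acc.2 ++ " ---\n" ++ block ++ "\n"],
           acc.2 + 1))
        (parts ++ ["\n\n=== CODE BLOCKS (PoC) ===\n"], 1)).1
  let output := PySem.Str.join "" parts
  if PySem.Str.strip output == "" then PySem.Str.slice text none (some 2000) else output

-- ===== PRECONDITION & SPEC =====
def Spec_extract_poc_from_readme_py (text : String) (out : String) : Prop := out = extract_poc_from_readme_py_alt text
instance (text : String) (out : String) : Decidable (Spec_extract_poc_from_readme_py text out) := by unfold Spec_extract_poc_from_readme_py; infer_instance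

-- ===== CLAIM (what is proved, stated in full; the proofs are below) =====
def Claim_equal_extract_poc_from_readme_py : Prop := ∀ (text : String), Dom_extract_poc_from_readme_py text → Spec_extract_poc_from_readme_py text (extract_poc_from_readme_py text)

-- ===== LEMMAS AND PROOFS =====

-- joining with the empty separator is flattening
theorem pvIntercalateNil (l : List (List Char)) : List.intercalate ([] : List Char) l = l.flatten := by
  simp only [List.intercalate]
  induction l with
  | nil => simp
  | cons a t ih => cases t <;> simp_all [List.intersperse]

-- ''.join over a snoc
theorem pvJoinSnoc (ps : List String) (p : String) :
    PySem.Str.join "" (ps ++ [p]) = PySem.Str.join "" ps ++ p := by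
  apply String.toList_inj.mp
  simp [PySem.Str.toList_join, PySem.Chars.join, pvIntercalateNil, String.toList_append]

theorem pvJoinSingle (p : String) : PySem.Str.join "" [p] = p := by
  apply String.toList_inj.mp
  simp [PySem.Str.toList_join, PySem.Chars.join, pvIntercalateNil]

theorem pvJoinPair (a b : String) : PySem.Str.join "" [a, b] = a ++ b := by
  apply String.toList_inj.mp
  simp [PySem.Str.toList_join, PySem.Chars.join, pvIntercalateNil, String.toList_append]

-- A's loop while in_code_block = true, related to B's closing-fence scan
theorem pvTrueState (lines : List String) : ∀ (res bs cb : List String),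
    lines.foldl pvStepA (res, true, bs, cb) =
      match pvSplitBlock lines with
      | none => (res, true, bs, cb ++ lines)
      | some (b, r) =>
          r.foldl pvStepA (res, false, bs ++ [PySem.Str.join "\n" (cb ++ b)], []) := by
  induction lines with
  | nil => intro res bs cb; simp [pvSplitBlock]
  | cons l rest ih =>
    intro res bs cb
    simp only [List.foldl_cons]
    by_cases hf : pvFence l
    · simp [pvStepA, hf, pvSplitBlock]
    · have hstep : pvStepA (res, true, bs, cb) l = (res, true, bs, cb ++ [l]) := by
        simp [pvStepA, hf]
      rw [hstep, ih res bs (cb ++ [l])]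
      simp only [pvSplitBlock, hf, Bool.false_eq_true, ite_false]
      cases hsb : pvSplitBlock rest with
      | none => simp
      | some br => obtain ⟨b, r⟩ := br; simp

theorem pvScan_nil : pvScan [] = ([], []) := by rw [pvScan]

theorem pvScan_fence_none {l : String} {rest : List String} (hf : pvFence l = true)
    (hsb : pvSplitBlock rest = none) : pvScan (l :: rest) = ([], []) := by
  rw [pvScan]
  simp only [hf, ite_true]
  split <;> simp_all

theorem pvScan_fence_some {l : String} {rest b r : List String} (hf : pvFence l = true)
    (hsb : pvSplitBlock rest = some (b, r)) :
    pvScan (l :: rest) = ((pvScan r).1, PySem.Str.join "\n" b :: (pvScan r).2) := by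
  rw [pvScan]
  simp only [hf, ite_true]
  split <;> simp_all

theorem pvScan_line {l : String} {rest : List String} (hf : pvFence l = false) :
    pvScan (l :: rest) =
      ((if pvKw l then l :: (pvScan rest).1 else (pvScan rest).1), (pvScan rest).2) := by
  rw [pvScan]
  simp [hf]

-- A's loop from a non-code state computes exactly B's scan (on the two used projections)
theorem pvFalseProj : ∀ (lines res bs : List String),
    (lines.foldl pvStepA (res, false, bs, [])).1 = res ++ (pvScan lines).1 ∧
    (lines.foldl pvStepA (res, false, bs, [])).2.2.1 = bs ++ (pvScan lines).2
  | [], res, bs => by simp [pvScan_nil]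
  | l :: rest, res, bs => by
    simp only [List.foldl_cons]
    by_cases hf : pvFence l
    · have hstep : pvStepA (res, false, bs, []) l = (res, true, bs, []) := by
        simp [pvStepA, hf]
      rw [hstep, pvTrueState]
      cases hsb : pvSplitBlock rest with
      | none =>
        simp [pvScan_fence_none hf hsb]
      | some br =>
        obtain ⟨b, r⟩ := br
        have hr := pvFalseProj r res (bs ++ [PySem.Str.join "\n" b])
        simp only [pvScan_fence_some hf hsb, List.nil_append]
        exact ⟨hr.1, by rw [hr.2]; simp⟩
    · have hstep : pvStepA (res, false, bs, []) l =
          ((if pvKw l then res ++ [l] else res), false, bs, []) := by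
        by_cases hk : pvKw l <;> simp [pvStepA, hf, hk]
      rw [hstep]
      have hr := pvFalseProj rest (if pvKw l then res ++ [l] else res) bs
      simp only [pvScan_line (by simpa using hf)]
      refine ⟨?_, by simpa using hr.2⟩
      rw [hr.1]
      by_cases hk : pvKw l <;> simp [hk]
termination_by lines _ _ => lines.length
decreasing_by
  · have := pvSplitBlock_lt rest b r hsb; simp; omega
  · simp

-- A's string-accumulating block loop equals B's part-list loop joined by ''
theorem pvAsm (bl : List String) : ∀ (ps : List String) (i : Int),
    (bl.foldl
      (fun (acc : String × Int) block =>
        (acc.1 ++ ("\n--- Block " ++ PySem.Int.toStr acc.2 ++ " ---\n" ++ block ++ "\n"),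
         acc.2 + 1))
      (PySem.Str.join "" ps, i)).1 =
    PySem.Str.join "" ((bl.foldl
      (fun (acc : List String × Int) block =>
        (acc.1 ++ ["\n--- Block " ++ PySem.Int.toStr acc.2 ++ " ---\n" ++ block ++ "\n"],
         acc.2 + 1))
      (ps, i)).1) := by
  induction bl with
  | nil => intro ps i; simp
  | cons b t ih =>
    intro ps i
    simp only [List.foldl_cons]
    rw [← pvJoinSnoc ps ("\n--- Block " ++ PySem.Int.toStr i ++ " ---\n" ++ b ++ "\n")]
    exact ih (ps ++ ["\n--- Block " ++ PySem.Int.toStr i ++ " ---\n" ++ b ++ "\n"]) (i + 1)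

-- ===== VERDICT (by name: the statement is the Claim_ definition above) =====
theorem extract_poc_from_readme_py_spec : Claim_equal_extract_poc_from_readme_py := by
  intro text _
  unfold Spec_extract_poc_from_readme_py extract_poc_from_readme_py extract_poc_from_readme_py_alt
  have hp := pvFalseProj (pvLines text) [] []
  simp only [List.nil_append] at hp
  dsimp only
  rw [hp.1, hp.2]
  by_cases hb : (pvScan (pvLines text)).2.isEmpty
  · simp only [hb, ite_true, pvJoinSingle]
  · simp only [hb, Bool.false_eq_true, if_false, List.cons_append, List.nil_append]
    have := pvAsm (PySem.List.slice (pvScan (pvLines text)).2 none (some 5))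
      [PySem.Str.join "\n" (PySem.List.slice (pvScan (pvLines text)).1 none (some 10)),
       "\n\n=== CODE BLOCKS (PoC) ===\n"] 1
    rw [pvJoinPair] at this
    rw [← this]
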